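-- pv_equiv track=rewrite | github.com/Spishewi/Polyponts-Racing | src/algorithms/ia.py | johnsons_algorithm
-- ===== SOURCE A (Python) =====
-- def johnsons_algorithm(tasks: dict[int, tuple[int, int]]) -> list[int]:
--     """
--     Implement the Johnson's algorithm to sort tasks based on their processing times.
--
--     Parameters:
--     tasks (dict): A dictionary where the keys are the task numbers and the values
--                   are tuples of two integers representing the processing times
--                   of the tasks on machine 1 and machine 2.
--
--     Returns:
--     list: A list of the task numbers sorted according to the Johnson's algorithm.
--     """
--     list_1 = []
--     list_2 = []
--
--     # Split the tasks into two lists based on their processing times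
--     for key, value in tasks.items():
--         if value[0] < value[1]:
--             list_1.append(key)
--         else:
--             list_2.append(key)
--
--     # Sort the lists
--     list_1.sort()
--     list_2.sort(reverse=True)
--
--     # Combine the two sorted lists into one
--     return list_1 + list_2
-- ===== SOURCE B (Python) =====
-- def johnsons_algorithm(tasks: dict[int, tuple[int, int]]) -> list[int]:
--     # Sort the keys by a composite tuple key: group tag first (tasks with smaller machine-1 time
--     # before the rest), then ascending key in the first group and descending
--     # key (via -k) in the second.
--     return sorted(tasks, key=lambda k: (0, k) if tasks[k][0] < tasks[k][1] else (1, -k))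
-- ===== Notes on version B (the rewrite author's own statement) =====
-- stated objective: idiomatic
-- what changed: Replaces the two-list split followed by two separate sorts with a single sorted() over the keys using one composite tuple key ((0, k) when the machine-1 time is below the machine-2 time, (1, -k) otherwise), which keeps group 1 before group 2 and orders group 2 descending; Pre_ excludes association lists with duplicate keys, which represent no Python dict.
import Mathlib
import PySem

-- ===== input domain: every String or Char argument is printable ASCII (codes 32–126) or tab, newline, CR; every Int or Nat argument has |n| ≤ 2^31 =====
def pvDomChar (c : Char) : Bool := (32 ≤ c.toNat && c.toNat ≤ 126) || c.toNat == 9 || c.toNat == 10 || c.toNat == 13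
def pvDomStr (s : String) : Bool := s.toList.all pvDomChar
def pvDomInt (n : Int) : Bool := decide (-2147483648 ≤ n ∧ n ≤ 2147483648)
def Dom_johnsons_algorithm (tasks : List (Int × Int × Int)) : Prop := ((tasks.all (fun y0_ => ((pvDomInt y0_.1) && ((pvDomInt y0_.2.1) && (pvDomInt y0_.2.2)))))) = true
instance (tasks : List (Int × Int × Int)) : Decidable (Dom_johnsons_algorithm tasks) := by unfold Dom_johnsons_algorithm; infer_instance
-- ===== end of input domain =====

-- B replaces A's two-list split and dual sort by ONE sorted() with a composite tuple key (idiomatic, same cost).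

-- ===== PORT A =====
def johnsons_algorithm (tasks : List (Int × Int × Int)) : List Int :=
  -- list_1/list_2 built in one loop, then list_1.sort(); list_2.sort(reverse=True); list_1 + list_2
  let p := tasks.foldl
    (fun (acc : List Int × List Int) kv =>
      if kv.2.1 < kv.2.2 then (acc.1 ++ [kv.1], acc.2) else (acc.1, acc.2 ++ [kv.1]))
    ([], [])
  PySem.List.sorted p.1 (fun x => x) false ++ PySem.List.sorted p.2 (fun x => x) true

-- ===== PORT B =====
def johnsons_algorithm_alt (tasks : List (Int × Int × Int)) : List Int :=
  -- sorted(tasks, key=lambda k: (0, k) if tasks[k][0] < tasks[k][1] else (1, -k))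
  -- tuple key ported via PySem.List.sorted2 (first component, second component)
  PySem.List.sorted2 (tasks.map Prod.fst)
    (fun k =>
      let v := (tasks.lookup k).getD (0, 0)
      if v.1 < v.2 then (0 : Int) else 1)
    (fun k =>
      let v := (tasks.lookup k).getD (0, 0)
      if v.1 < v.2 then k else -k) false

-- ===== PRECONDITION & SPEC =====
-- Pre_ excludes association lists with duplicate keys: those do not represent any Python dict
-- (A's argument type), so neither behaviour is specified there.
def Pre_johnsons_algorithm (tasks : List (Int × Int × Int)) : Prop :=
  (tasks.map Prod.fst).Nodup
instance (tasks : List (Int × Int × Int)) : Decidable (Pre_johnsons_algorithm tasks) := by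
  unfold Pre_johnsons_algorithm; infer_instance
def pvWitness_johnsons_algorithm : (List (Int × Int × Int)) := [(1, 2, 3), (2, 3, 1), (-4, 0, 0)]

def Spec_johnsons_algorithm (tasks : List (Int × Int × Int)) (out : List Int) : Prop := out = johnsons_algorithm_alt tasks
instance (tasks : List (Int × Int × Int)) (out : List Int) : Decidable (Spec_johnsons_algorithm tasks out) := by unfold Spec_johnsons_algorithm; infer_instance

-- ===== CLAIM (what is proved, stated in full; the proofs are below) =====
def Claim_equal_johnsons_algorithm : Prop := ∀ (tasks : List (Int × Int × Int)), Dom_johnsons_algorithm tasks → Pre_johnsons_algorithm tasks → Spec_johnsons_algorithm tasks (johnsons_algorithm tasks)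

-- ===== LEMMAS AND PROOFS =====

-- the predicate that splits the tasks
def jaCond (kv : Int × Int × Int) : Bool := decide (kv.2.1 < kv.2.2)

-- a numeric key (proof device only) whose order coincides with B's tuple key on Dom
def jaKey (tasks : List (Int × Int × Int)) (k : Int) : Int :=
  let v := (tasks.lookup k).getD (0, 0)
  if v.1 < v.2 then k else 2 ^ 33 - k

lemma ja_fold_eq (tasks : List (Int × Int × Int)) (acc : List Int × List Int) :
    tasks.foldl
      (fun (acc : List Int × List Int) kv =>
        if kv.2.1 < kv.2.2 then (acc.1 ++ [kv.1], acc.2) else (acc.1, acc.2 ++ [kv.1])) acc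
    = (acc.1 ++ (tasks.filter jaCond).map Prod.fst,
       acc.2 ++ (tasks.filter (fun kv => !jaCond kv)).map Prod.fst) := by
  induction tasks generalizing acc with
  | nil => simp
  | cons kv rest ih =>
    by_cases h : kv.2.1 < kv.2.2 <;>
      simp [ih, jaCond, h]

lemma ja_lookup_of_mem {tasks : List (Int × Int × Int)}
    (hnd : (tasks.map Prod.fst).Nodup) {kv : Int × Int × Int} (hm : kv ∈ tasks) :
    tasks.lookup kv.1 = some kv.2 := by
  induction tasks with
  | nil => cases hm
  | cons hd rest ih =>
    simp only [List.map_cons, List.nodup_cons] at hnd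
    rcases List.mem_cons.mp hm with rfl | hm'
    · simp [List.lookup]
    · have hne : hd.1 ≠ kv.1 := by
        intro h
        exact hnd.1 (h ▸ List.mem_map_of_mem hm')
      have hb : (kv.1 == hd.1) = false := by simp [Ne.symm hne]
      simp [List.lookup, hb, ih hnd.2 hm']

lemma ja_key_mem1 {tasks : List (Int × Int × Int)}
    (hnd : (tasks.map Prod.fst).Nodup) {a : Int}
    (ha : a ∈ ((tasks.filter jaCond).map Prod.fst)) :
    jaKey tasks a = a := by
  rcases List.mem_map.mp ha with ⟨kv, hkv, rfl⟩
  rcases List.mem_filter.mp hkv with ⟨hmem, hc⟩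
  have := ja_lookup_of_mem hnd hmem
  simp only [jaCond, decide_eq_true_eq] at hc
  simp [jaKey, this, hc]

lemma ja_key_mem2 {tasks : List (Int × Int × Int)}
    (hnd : (tasks.map Prod.fst).Nodup) {a : Int}
    (ha : a ∈ ((tasks.filter (fun kv => !jaCond kv)).map Prod.fst)) :
    jaKey tasks a = 2 ^ 33 - a := by
  rcases List.mem_map.mp ha with ⟨kv, hkv, rfl⟩
  rcases List.mem_filter.mp hkv with ⟨hmem, hc⟩
  have := ja_lookup_of_mem hnd hmem
  simp only [jaCond, Bool.not_eq_eq_eq_not, Bool.not_true, decide_eq_false_iff_not] at hc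
  simp [jaKey, this, hc]

lemma ja_bound {tasks : List (Int × Int × Int)}
    (hdom : Dom_johnsons_algorithm tasks) {a : Int} (ha : a ∈ tasks.map Prod.fst) :
    -2147483648 ≤ a ∧ a ≤ 2147483648 := by
  rcases List.mem_map.mp ha with ⟨kv, hkv, rfl⟩
  unfold Dom_johnsons_algorithm at hdom
  have := List.all_eq_true.mp hdom kv hkv
  simp only [pvDomInt, Bool.and_eq_true, decide_eq_true_eq] at this
  exact this.1

lemma ja_nodup_pairwise_lt {l : List Int}
    (h1 : l.Pairwise (fun a b => a ≤ b)) (h2 : l.Nodup) :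
    l.Pairwise (fun a b => a < b) :=
  (h1.and h2).imp (fun h => lt_of_le_of_ne h.1 h.2)

lemma ja_nodup_pairwise_gt {l : List Int}
    (h1 : l.Pairwise (fun a b => b ≤ a)) (h2 : l.Nodup) :
    l.Pairwise (fun a b => b < a) :=
  (h1.and h2).imp (fun h => lt_of_le_of_ne h.1 (Ne.symm h.2))

-- insertBy only compares the inserted element against members: congruence
lemma ja_insertBy_congr {α : Type} (f g : α → α → Bool) (x : α) (ys : List α)
    (h : ∀ y ∈ ys, f x y = g x y) :
    PySem.List.insertBy f x ys = PySem.List.insertBy g x ys := by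
  induction ys with
  | nil => rfl
  | cons y ys ih =>
    have hy := h y (List.mem_cons_self ..)
    simp only [PySem.List.insertBy, hy]
    split
    · rfl
    · rw [ih (fun z hz => h z (List.mem_cons_of_mem _ hz))]

lemma ja_foldl_insertBy_congr {α : Type} (f g : α → α → Bool) (S : List α)
    (h : ∀ a ∈ S, ∀ b ∈ S, f a b = g a b) :
    ∀ (xs acc : List α), (∀ x ∈ xs, x ∈ S) → (∀ y ∈ acc, y ∈ S) →
      xs.foldl (fun acc x => PySem.List.insertBy f x acc) acc
        = xs.foldl (fun acc x => PySem.List.insertBy g x acc) acc := by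
  intro xs
  induction xs with
  | nil => intro acc _ _; rfl
  | cons x xs ih =>
    intro acc hxs hacc
    have hxS : x ∈ S := hxs x (List.mem_cons_self ..)
    simp only [List.foldl_cons]
    rw [ja_insertBy_congr f g x acc (fun y hy => h x hxS y (hacc y hy)), ih]
    · exact fun z hz => hxs z (List.mem_cons_of_mem _ hz)
    · intro y hy
      rcases (PySem.List.mem_insertBy ..).mp hy with rfl | hy'
      · exact hxS
      · exact hacc y hy'

-- B's sorted2 with the tuple key equals a plain sorted with the numeric key jaKey on Dom
lemma ja_alt_eq_sorted {tasks : List (Int × Int × Int)}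
    (hdom : Dom_johnsons_algorithm tasks) :
    johnsons_algorithm_alt tasks
      = PySem.List.sorted (tasks.map Prod.fst) (jaKey tasks) false := by
  unfold johnsons_algorithm_alt
  rw [PySem.List.sorted_eq_foldl_insertBy]
  show List.foldl (fun acc x => PySem.List.insertBy _ x acc) [] (tasks.map Prod.fst) = _
  refine ja_foldl_insertBy_congr _ _ (tasks.map Prod.fst) ?_ _ [] (fun x hx => hx) (by simp)
  intro a ha b hb
  have hba := ja_bound hdom ha
  have hbb := ja_bound hdom hb
  simp only [jaKey]
  rw [Bool.eq_iff_iff]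
  simp only [Bool.or_eq_true, Bool.and_eq_true, Bool.not_eq_true',
    decide_eq_true_eq, decide_eq_false_iff_not]
  by_cases h1 : ((tasks.lookup a).getD (0, 0)).1 < ((tasks.lookup a).getD (0, 0)).2 <;>
    by_cases h2 : ((tasks.lookup b).getD (0, 0)).1 < ((tasks.lookup b).getD (0, 0)).2 <;>
    simp [h1, h2] <;> omega

-- ===== VERDICT (by name: the statement is the Claim_ definition above) =====
theorem johnsons_algorithm_spec : Claim_equal_johnsons_algorithm := by
  intro tasks hdom hnd
  unfold Spec_johnsons_algorithm johnsons_algorithm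
  rw [ja_alt_eq_sorted hdom, ja_fold_eq]
  set l1 : List Int := (tasks.filter jaCond).map Prod.fst with hl1
  set l2 : List Int := (tasks.filter (fun kv => !jaCond kv)).map Prod.fst with hl2
  have hnd1 : l1.Nodup := hnd.sublist ((List.filter_sublist).map _)
  have hnd2 : l2.Nodup := hnd.sublist ((List.filter_sublist).map _)
  set s1 := PySem.List.sorted l1 (fun x => x) false with hs1
  set s2 := PySem.List.sorted l2 (fun x => x) true with hs2
  have hp1 : s1.Perm l1 := PySem.List.sorted_perm ..
  have hp2 : s2.Perm l2 := PySem.List.sorted_perm ..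
  have hperm : (s1 ++ s2).Perm (tasks.map Prod.fst) := by
    refine (hp1.append hp2).trans ?_
    have := (List.filter_append_perm jaCond tasks).map Prod.fst
    simpa [hl1, hl2] using this
  have hkey1 : ∀ a ∈ s1, jaKey tasks a = a := fun a ha =>
    ja_key_mem1 hnd (hp1.mem_iff.mp ha)
  have hkey2 : ∀ a ∈ s2, jaKey tasks a = 2 ^ 33 - a := fun a ha =>
    ja_key_mem2 hnd (hp2.mem_iff.mp ha)
  have hpw : (s1 ++ s2).Pairwise (fun a b => jaKey tasks a < jaKey tasks b) := by
    rw [List.pairwise_append]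
    refine ⟨?_, ?_, ?_⟩
    · have := ja_nodup_pairwise_lt (PySem.List.sorted_pairwise l1 (fun x => x))
        (hp1.nodup_iff.mpr hnd1)
      refine this.imp_of_mem ?_
      intro a b ha hb h
      rw [hkey1 a ha, hkey1 b hb]; exact h
    · have := ja_nodup_pairwise_gt (PySem.List.sorted_pairwise_rev l2 (fun x => x))
        (hp2.nodup_iff.mpr hnd2)
      refine this.imp_of_mem ?_
      intro a b ha hb h
      rw [hkey2 a ha, hkey2 b hb]; omega
    · intro a ha b hb
      have hba : a ∈ tasks.map Prod.fst := hperm.mem_iff.mp (List.mem_append_left _ ha)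
      have hbb : b ∈ tasks.map Prod.fst := hperm.mem_iff.mp (List.mem_append_right _ hb)
      have b1 := ja_bound hdom hba
      have b2 := ja_bound hdom hbb
      rw [hkey1 a ha, hkey2 b hb]; omega
  exact (PySem.List.sorted_eq_of_perm_of_pairwise_lt (tasks.map Prod.fst) (s1 ++ s2)
    (jaKey tasks) hperm hpw).symm
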